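-- pv_equiv track=rewrite | github.com/Project-VERANDA/Audio-Transcript-Anonymizer-TUB-AP | spacy/training/SpacyNerTraining.py | clean_entity_spans
-- ===== SOURCE A (Python) =====
-- def clean_entity_spans(text, entities):
--     cleaned = []
--     text_len = len(text)
--     for start, end, label in entities:
--         if start < 0 or end > text_len or start >= end or not label:
--             continue
--         while start < end and start < text_len and text[start].isspace():
--             start += 1
--         while end > start and end <= text_len and text[end - 1].isspace():
--             end -= 1
--         if start < end and text[start:end].strip():
--             cleaned.append((start, end, label))
--     return cleaned
-- ===== SOURCE B (Python) =====
-- def clean_entity_spans(text, entities):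
--     cleaned = []
--     text_len = len(text)
--     for start, end, label in entities:
--         if start < 0 or end > text_len or start >= end or not label:
--             continue
--         span = text[start:end]
--         stripped = span.strip()
--         if not stripped:
--             continue
--         new_start = start + (len(span) - len(span.lstrip()))
--         cleaned.append((new_start, new_start + len(stripped), label))
--     return cleaned
-- ===== Notes on version B (the rewrite author's own statement) =====
-- stated objective: simpler
-- what changed: Replaces A's two index-by-index whitespace-scanning while loops with one slice plus strip/lstrip library calls and offset arithmetic deriving the trimmed bounds.
import Mathlib
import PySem

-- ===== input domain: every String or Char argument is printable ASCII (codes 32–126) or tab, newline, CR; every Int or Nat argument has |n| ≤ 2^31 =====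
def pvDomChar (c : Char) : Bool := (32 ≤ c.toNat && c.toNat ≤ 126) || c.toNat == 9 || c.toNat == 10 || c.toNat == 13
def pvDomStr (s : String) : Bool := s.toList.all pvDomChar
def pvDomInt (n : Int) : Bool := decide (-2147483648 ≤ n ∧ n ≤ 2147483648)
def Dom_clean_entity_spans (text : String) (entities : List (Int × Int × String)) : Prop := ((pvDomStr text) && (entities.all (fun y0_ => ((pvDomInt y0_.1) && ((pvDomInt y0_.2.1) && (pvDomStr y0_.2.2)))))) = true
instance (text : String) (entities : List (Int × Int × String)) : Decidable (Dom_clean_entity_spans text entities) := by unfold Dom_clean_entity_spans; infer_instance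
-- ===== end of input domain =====

-- B replaces A's two character-by-character whitespace-trimming while loops with one slice
-- plus strip/lstrip library calls and offset arithmetic (objective: simpler); same return value.

-- ===== PORT A =====
-- while start < end and start < text_len and text[start].isspace(): start += 1
def pvTrimStartA (cs : List Char) (e : Int) (s : Int) : Int :=
  if h : s < e ∧ s < (cs.length : Int) ∧ ((PySem.List.pyGet? cs s).elim false PySem.Chars.isspace) = true then
    pvTrimStartA cs e (s + 1)
  else s
termination_by (e - s).toNat
decreasing_by omega

-- while end > start and end <= text_len and text[end - 1].isspace(): end -= 1
def pvTrimEndA (cs : List Char) (s : Int) (e : Int) : Int :=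
  if h : e > s ∧ e ≤ (cs.length : Int) ∧ ((PySem.List.pyGet? cs (e - 1)).elim false PySem.Chars.isspace) = true then
    pvTrimEndA cs s (e - 1)
  else e
termination_by (e - s).toNat
decreasing_by omega

def pvStepA (cs : List Char) (cleaned : List (Int × Int × String)) (ent : Int × Int × String) : List (Int × Int × String) :=
  let (start, end_, label) := ent
  if start < 0 ∨ end_ > (cs.length : Int) ∨ start ≥ end_ ∨ label = "" then cleaned
  else
    let s := pvTrimStartA cs end_ start
    let e := pvTrimEndA cs s end_
    if s < e ∧ PySem.Chars.strip (PySem.List.slice cs (some s) (some e)) ≠ [] then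
      cleaned ++ [(s, e, label)]
    else cleaned

def clean_entity_spans (text : String) (entities : List (Int × Int × String)) : List (Int × Int × String) :=
  entities.foldl (pvStepA text.toList) []

-- ===== PORT B =====
def pvStepB (cs : List Char) (cleaned : List (Int × Int × String)) (ent : Int × Int × String) : List (Int × Int × String) :=
  let (start, end_, label) := ent
  if start < 0 ∨ end_ > (cs.length : Int) ∨ start ≥ end_ ∨ label = "" then cleaned
  else
    let span := PySem.List.slice cs (some start) (some end_)
    let stripped := PySem.Chars.strip span
    if stripped = [] then cleaned
    else
      let new_start := start + ((span.length : Int) - ((PySem.Chars.lstrip span).length : Int))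
      cleaned ++ [(new_start, new_start + (stripped.length : Int), label)]

def clean_entity_spans_alt (text : String) (entities : List (Int × Int × String)) : List (Int × Int × String) :=
  entities.foldl (pvStepB text.toList) []

-- ===== PRECONDITION & SPEC =====
def Spec_clean_entity_spans (text : String) (entities : List (Int × Int × String)) (out : List (Int × Int × String)) : Prop := out = clean_entity_spans_alt text entities
instance (text : String) (entities : List (Int × Int × String)) (out : List (Int × Int × String)) : Decidable (Spec_clean_entity_spans text entities out) := by unfold Spec_clean_entity_spans; infer_instance

-- ===== CLAIM (what is proved, stated in full; the proofs are below) =====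
def Claim_equal_clean_entity_spans : Prop := ∀ (text : String) (entities : List (Int × Int × String)), Dom_clean_entity_spans text entities → Spec_clean_entity_spans text entities (clean_entity_spans text entities)

-- ===== LEMMAS AND PROOFS =====

lemma pv_pyGet (cs : List Char) (s : Int) (h0 : 0 ≤ s) (hl : s < (cs.length : Int)) :
    PySem.List.pyGet? cs s = some (cs[s.toNat]'(by omega)) := by
  simp [PySem.List.pyGet?, PySem.List.pyIdx?, h0, hl]

lemma pv_slice_cons (cs : List Char) (s e : Int) (h0 : 0 ≤ s) (hse : s < e) (hl : s < (cs.length : Int)) :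
    PySem.List.slice cs (some s) (some e) =
      cs[s.toNat]'(by omega) :: PySem.List.slice cs (some (s + 1)) (some e) := by
  rw [PySem.List.slice_toNat cs h0 (by omega), PySem.List.slice_toNat cs (by omega) (by omega)]
  rw [List.drop_eq_getElem_cons (by omega)]
  have h1 : (s + 1).toNat = s.toNat + 1 := by omega
  have h2 : e.toNat - s.toNat = (e.toNat - (s.toNat + 1)) + 1 := by omega
  rw [h2, List.take_succ_cons, h1]

lemma pv_slice_snoc (cs : List Char) (s e : Int) (h0 : 0 ≤ s) (hse : s < e) (hl : e ≤ (cs.length : Int)) :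
    PySem.List.slice cs (some s) (some e) =
      PySem.List.slice cs (some s) (some (e - 1)) ++ [cs[(e - 1).toNat]'(by omega)] := by
  rw [PySem.List.slice_toNat cs h0 (by omega), PySem.List.slice_toNat cs h0 (by omega)]
  have h2 : e.toNat - s.toNat = ((e - 1).toNat - s.toNat) + 1 := by omega
  rw [h2, List.take_add_one]
  congr 1
  rw [List.getElem?_drop]
  have h3 : s.toNat + ((e - 1).toNat - s.toNat) = (e - 1).toNat := by omega
  rw [h3, List.getElem?_eq_getElem (by omega)]
  simp

lemma pv_trimStart_spec (cs : List Char) (e : Int) (he : 0 ≤ e) (hl : e ≤ (cs.length : Int)) :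
    ∀ n (s : Int), 0 ≤ s → (e - s).toNat = n →
    pvTrimStartA cs e s =
      s + (((PySem.List.slice cs (some s) (some e)).takeWhile PySem.Chars.isspace).length : Int) := by
  intro n
  induction n using Nat.strong_induction_on with
  | _ n ih =>
    intro s h0 hn
    rw [pvTrimStartA]
    split_ifs with hc
    · obtain ⟨h1, h2, h3⟩ := hc
      rw [pv_pyGet cs s h0 h2] at h3
      simp only [Option.elim] at h3
      rw [pv_slice_cons cs s e h0 h1 h2, List.takeWhile_cons_of_pos h3]
      rw [ih ((e - (s + 1)).toNat) (by omega) (s + 1) (by omega) rfl]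
      simp; omega
    · push_neg at hc
      by_cases h1 : s < e
      · have h2 : s < (cs.length : Int) := by omega
        have h3 := hc h1 h2
        rw [pv_pyGet cs s h0 h2] at h3
        simp only [Option.elim] at h3
        rw [pv_slice_cons cs s e h0 h1 h2, List.takeWhile_cons_of_neg (by simp [h3])]
        simp
      · have hnil : PySem.List.slice cs (some s) (some e) = [] := by
          rw [PySem.List.slice_toNat cs h0 he]
          have h2 : e.toNat - s.toNat = 0 := by omega
          rw [h2]; simp
        rw [hnil]; simp

lemma pv_trimEnd_spec (cs : List Char) (s : Int) (h0 : 0 ≤ s) :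
    ∀ n (e : Int), 0 ≤ e → e ≤ (cs.length : Int) → (e - s).toNat = n →
    pvTrimEndA cs s e =
      e - (((PySem.List.slice cs (some s) (some e)).reverse.takeWhile PySem.Chars.isspace).length : Int) := by
  intro n
  induction n using Nat.strong_induction_on with
  | _ n ih =>
    intro e he hl hn
    rw [pvTrimEndA]
    split_ifs with hc
    · obtain ⟨h1, h2, h3⟩ := hc
      rw [pv_pyGet cs (e - 1) (by omega) (by omega)] at h3
      simp only [Option.elim] at h3
      rw [pv_slice_snoc cs s e h0 h1 h2, List.reverse_append]
      simp only [List.reverse_singleton, List.singleton_append]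
      rw [List.takeWhile_cons_of_pos h3]
      rw [ih ((e - 1 - s).toNat) (by omega) (e - 1) (by omega) (by omega) rfl]
      simp; omega
    · push_neg at hc
      by_cases h1 : s < e
      · have h3 := hc h1 hl
        rw [pv_pyGet cs (e - 1) (by omega) (by omega)] at h3
        simp only [Option.elim] at h3
        rw [pv_slice_snoc cs s e h0 h1 hl, List.reverse_append]
        simp only [List.reverse_singleton, List.singleton_append]
        rw [List.takeWhile_cons_of_neg (by simpa using h3)]
        simp
      · have hnil : PySem.List.slice cs (some s) (some e) = [] := by
          rw [PySem.List.slice_toNat cs h0 he]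
          have h2 : e.toNat - s.toNat = 0 := by omega
          rw [h2]; simp
        rw [hnil]; simp

lemma pv_dropWhile_eq_drop (p : Char → Bool) (l : List Char) :
    l.dropWhile p = l.drop (l.takeWhile p).length := by
  induction l with
  | nil => rfl
  | cons a t ih =>
    by_cases h : p a
    · simp [List.takeWhile_cons, h, ih]
    · simp [List.dropWhile_cons, h]

lemma pv_takeWhile_len_le (p : Char → Bool) (l : List Char) :
    (l.takeWhile p).length ≤ l.length :=
  (List.takeWhile_prefix p).length_le

lemma pv_strip_eq_nil_iff (l : List Char) :
    PySem.Chars.strip l = [] ↔ ∀ c ∈ l, PySem.Chars.isspace c := by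
  unfold PySem.Chars.strip PySem.Chars.rstrip PySem.Chars.lstrip
  rw [List.reverse_eq_nil_iff, List.dropWhile_eq_nil_iff]
  simp only [List.mem_reverse]
  constructor
  · intro h c hc
    rw [← List.takeWhile_append_dropWhile (p := PySem.Chars.isspace) (l := l)] at hc
    rcases List.mem_append.1 hc with h1 | h1
    · exact List.mem_takeWhile_imp h1
    · exact h _ h1
  · intro h c hc
    exact h _ ((List.dropWhile_sublist _).subset hc)

lemma pv_step_eq (cs : List Char) (acc : List (Int × Int × String)) (ent : Int × Int × String) :
    pvStepA cs acc ent = pvStepB cs acc ent := by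
  obtain ⟨start, end_, label⟩ := ent
  by_cases hg : start < 0 ∨ end_ > (cs.length : Int) ∨ start ≥ end_ ∨ label = ""
  · simp only [pvStepA, pvStepB, if_pos hg]
  · push_neg at hg
    obtain ⟨h0, hl, hse, hlab⟩ := hg
    simp only [pvStepA, pvStepB, PySem.Chars.lstrip,
      if_neg (show ¬(start < 0 ∨ end_ > (cs.length : Int) ∨ start ≥ end_ ∨ label = "") by
        push_neg; exact ⟨h0, hl, hse, hlab⟩)]
    set span := PySem.List.slice cs (some start) (some end_) with hspan
    have hspanlen : (span.length : Int) = end_ - start := by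
      rw [hspan, PySem.List.slice_toNat cs h0 (by omega)]
      simp [List.length_take, List.length_drop]
      omega
    have hLle := pv_takeWhile_len_le PySem.Chars.isspace span
    set L := (span.takeWhile PySem.Chars.isspace).length with hL
    set R := span.dropWhile PySem.Chars.isspace with hRdef
    have hLR : L + R.length = span.length := by
      rw [hL, hRdef, ← List.length_append, List.takeWhile_append_dropWhile]
    have hs' : pvTrimStartA cs end_ start = start + L := by
      rw [pv_trimStart_spec cs end_ (by omega) hl _ start h0 rfl, ← hspan, ← hL]
    have hsub : ∀ t : Int, start + (L : Int) ≤ t → t ≤ end_ →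
        PySem.List.slice cs (some (start + L)) (some t) = R.take (t - (start + L)).toNat := by
      intro t h1 h2
      rw [PySem.List.slice_toNat cs (by omega) (by omega)]
      rw [hRdef, pv_dropWhile_eq_drop, ← hL, hspan, PySem.List.slice_toNat cs h0 (by omega)]
      rw [List.drop_take, List.drop_drop, List.take_take]
      rw [min_eq_left (by omega)]
      congr 1
      · omega
      · congr 1
        omega
    have hsliceR : PySem.List.slice cs (some (start + L)) (some end_) = R := by
      rw [hsub end_ (by omega) le_rfl]
      have : (end_ - (start + (L : Int))).toNat = R.length := by omega
      rw [this, List.take_length]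
    set T := (R.reverse.takeWhile PySem.Chars.isspace).length with hT
    have hTle : T ≤ R.length := by
      have := pv_takeWhile_len_le PySem.Chars.isspace R.reverse
      simpa using this
    have he' : pvTrimEndA cs (start + L) end_ = end_ - T := by
      rw [pv_trimEnd_spec cs (start + L) (by omega) _ end_ (by omega) hl rfl, hsliceR, ← hT]
    set stripped := PySem.Chars.strip span with hstrdef
    have hstrip : stripped = R.take (R.length - T) := by
      rw [hstrdef]
      show PySem.Chars.rstrip (PySem.Chars.lstrip span) = R.take (R.length - T)
      unfold PySem.Chars.rstrip PySem.Chars.lstrip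
      rw [← hRdef, pv_dropWhile_eq_drop, ← hT, List.reverse_drop]
      simp
    have hstriplen : stripped.length = R.length - T := by
      rw [hstrip]; simp
    rw [hs', he']
    by_cases hnil : stripped = []
    · rw [if_pos hnil, if_neg]
      intro ⟨hlt, _⟩
      have : stripped.length = 0 := by simp [hnil]
      omega
    · have hpos : 0 < stripped.length := List.length_pos_of_ne_nil hnil
      have hslice2 : PySem.List.slice cs (some (start + L)) (some (end_ - T)) = stripped := by
        rw [hsub (end_ - T) (by omega) (by omega)]
        have : (end_ - (T : Int) - (start + (L : Int))).toNat = R.length - T := by omega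
        rw [this, ← hstrip]
      have hRlen : 0 < R.length := by omega
      have hhead : PySem.Chars.isspace (R[0]'hRlen) = false := by
        have := List.dropWhile_get_zero_not PySem.Chars.isspace span (by rw [← hRdef]; omega)
        simpa [← hRdef] using this
      rw [if_neg hnil, if_pos]
      · have : end_ - (T : Int) = start + L + stripped.length := by omega
        rw [this]
        have : ((span.length : Int) - (R.length : Int)) = L := by omega
        rw [this]
      · constructor
        · omega
        · rw [hslice2, Ne, pv_strip_eq_nil_iff]
          intro hall
          have hmem : R[0]'hRlen ∈ stripped := by
            rw [hstrip]
            have : (R.take (R.length - T))[0]'(by simpa [hstrip] using hpos) = R[0]'hRlen :=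
              List.getElem_take
            rw [← this]
            exact List.getElem_mem _
          have := hall _ hmem
          rw [hhead] at this
          exact Bool.noConfusion this

-- ===== VERDICT (by name: the statement is the Claim_ definition above) =====
theorem clean_entity_spans_spec : Claim_equal_clean_entity_spans := by
  intro text entities _
  unfold Spec_clean_entity_spans clean_entity_spans clean_entity_spans_alt
  exact (List.foldl_ext _ _ [] (fun a b _ => (pv_step_eq text.toList a b).symm)).symm
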